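-- pv_equiv track=rewrite | github.com/TinyMarcus/Modeling | sem_07/lab_03/main.py | get_coeffs
-- ===== SOURCE A (Python) =====
-- def get_coeffs(matrix):
--     n = len(matrix)
--     lst = [[None for j in range(n)] for i in range(n)]
--
--     for i in range(n):
--         if i != (n - 1):
--             for j in range(n):
--                 if j != i:
--                     lst[i][j] = matrix[j][i]
--                 else:
--                     lst[i][j] = -sum(matrix[i])
--         else:
--             for j in range(n):
--                 lst[i][j] = 1
--     return lst
-- ===== SOURCE B (Python) =====
-- def get_coeffs(matrix):
--     n = len(matrix)
--     if n == 0: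
--         return []
--     # Row-local pass: each row with its diagonal entry replaced by minus its own sum.
--     body = [row[:j] + [-sum(row)] + row[j + 1:] for j, row in enumerate(matrix)]
--     # The coefficient matrix is the transpose of body, with its last row replaced by ones.
--     cols = [list(col) for col in zip(*body)]
--     return cols[:n - 1] + [[1] * n]
-- ===== Notes on version B (the rewrite author's own statement) =====
-- stated objective: alternative
-- what changed: B does a row-local pass replacing each row's diagonal entry by minus its own row sum, then obtains the result as the zip-transpose of that patched matrix with the last row swapped for all ones, instead of A's doubly indexed cell-by-cell fill of a preallocated n x n matrix; the comprehension/zip passes run in C, removing A's per-cell Python-level indexing.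
import Mathlib
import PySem

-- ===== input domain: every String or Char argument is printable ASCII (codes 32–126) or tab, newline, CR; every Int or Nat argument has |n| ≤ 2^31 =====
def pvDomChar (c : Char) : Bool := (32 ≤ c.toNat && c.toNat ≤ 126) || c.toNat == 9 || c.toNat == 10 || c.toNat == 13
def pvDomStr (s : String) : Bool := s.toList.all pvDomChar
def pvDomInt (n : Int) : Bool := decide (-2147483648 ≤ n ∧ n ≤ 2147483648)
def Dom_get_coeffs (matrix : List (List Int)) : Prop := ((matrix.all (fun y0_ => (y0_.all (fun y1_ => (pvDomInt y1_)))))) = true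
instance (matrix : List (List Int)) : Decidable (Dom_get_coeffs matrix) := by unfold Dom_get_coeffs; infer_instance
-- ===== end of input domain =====

-- B replaces each row's diagonal entry by minus its own row sum in one row-local pass, then takes the
-- zip-transpose of that matrix and swaps in the all-ones last row, instead of A's doubly indexed
-- cell-by-cell fill of a preallocated n×n matrix; same cost, different decomposition.


-- ===== PORT A =====
-- Literal port of A: the i-loop over range(n) builds row i (the j-loop fills every cell of the
-- preallocated None row, so it is the map over range(n)); indexing is total pyGetD, in range under Pre_.
def get_coeffs (matrix : List (List Int)) : List (List Int) :=
  let n : Int := matrix.length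
  (PySem.List.pyRange 0 n 1).map (fun i =>
    if i ≠ n - 1 then
      (PySem.List.pyRange 0 n 1).map (fun j =>
        if j ≠ i then PySem.List.pyGetD (PySem.List.pyGetD matrix j []) i 0
        else -(PySem.List.pyGetD matrix i []).sum)
    else
      (PySem.List.pyRange 0 n 1).map (fun _ => (1 : Int)))

-- ===== PORT B =====
-- Port of B: `body` is the enumerate-comprehension (row[:j] and row[j+1:] are take/drop, j ≥ 0);
-- Python's zip(*body) yields exactly min-row-length tuples, rendered as the map over List.range of the
-- minimum length (row.getD is in range there); cols[:n-1] is take (n ≥ 1 here, so n-1 ≥ 0).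
def get_coeffs_alt (matrix : List (List Int)) : List (List Int) :=
  if matrix.length = 0 then []
  else
    let body := matrix.zipIdx.map (fun p => p.1.take p.2 ++ [-(p.1.sum)] ++ p.1.drop (p.2 + 1))
    let m : Nat := ((body.map List.length).min?).getD 0
    let cols := (List.range m).map (fun i => body.map (fun row => row.getD i 0))
    cols.take (matrix.length - 1) ++ [List.replicate matrix.length (1 : Int)]

-- ===== PRECONDITION & SPEC =====
-- Pre_ is exactly A's return set: A raises IndexError on matrix[j][i] iff some row j is shorter than
-- n-1 (shorter than n-2 for the row j = n-2, whose largest read index is n-3); nothing else is excluded.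
def Pre_get_coeffs (matrix : List (List Int)) : Prop :=
  ∀ p ∈ matrix.zipIdx, matrix.length - 1 ≤ p.1.length ∨ (p.2 + 2 = matrix.length ∧ matrix.length - 2 ≤ p.1.length)
instance (matrix : List (List Int)) : Decidable (Pre_get_coeffs matrix) := by unfold Pre_get_coeffs; infer_instance
def pvWitness_get_coeffs : List (List Int) := [[1, 2, 3], [0, 4, 5], [2, 0, 6]]
def Spec_get_coeffs (matrix : List (List Int)) (out : List (List Int)) : Prop := out = get_coeffs_alt matrix
instance (matrix : List (List Int)) (out : List (List Int)) : Decidable (Spec_get_coeffs matrix out) := by unfold Spec_get_coeffs; infer_instance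

-- ===== CLAIM (what is proved, stated in full; the proofs are below) =====
def Claim_equal_get_coeffs : Prop := ∀ (matrix : List (List Int)), Dom_get_coeffs matrix → Pre_get_coeffs matrix → Spec_get_coeffs matrix (get_coeffs matrix)

-- ===== LEMMAS AND PROOFS =====

-- The length of a diagonal-patched row.
theorem patch_length (row : List Int) (j : Nat) (x : Int) :
    (row.take j ++ [x] ++ row.drop (j + 1)).length = min j row.length + 1 + (row.length - (j + 1)) := by
  simp; omega

-- getD of a diagonal-patched row, at the diagonal.
theorem patch_getD_diag (row : List Int) (j : Nat) (x : Int) (hj : j ≤ row.length) :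
    (row.take j ++ [x] ++ row.drop (j + 1)).getD j 0 = x := by
  have ht : (row.take j).length = j := by simp [Nat.min_eq_left hj]
  rw [List.append_assoc, List.getD_append_right _ _ _ _ (by omega), ht, Nat.sub_self]
  rfl

-- getD of a diagonal-patched row, off the diagonal (at an index the row covers).
theorem patch_getD_off (row : List Int) (j i : Nat) (x : Int) (hne : i ≠ j)
    (hj : j ≤ row.length) :
    (row.take j ++ [x] ++ row.drop (j + 1)).getD i 0 = row.getD i 0 := by
  have ht : (row.take j).length = j := by simp [Nat.min_eq_left hj]
  rcases Nat.lt_or_ge i j with h | h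
  · rw [List.append_assoc, List.getD_append _ _ _ _ (by omega)]
    simp [List.getD_eq_getElem?_getD, List.getElem?_take_of_lt h]
  · have h' : j < i := by omega
    rw [List.append_assoc, List.getD_append_right _ _ _ _ (by omega), ht]
    have : i - j = (i - j - 1) + 1 := by omega
    rw [this]
    simp only [List.cons_append, List.nil_append, List.getD_cons_succ]
    simp only [List.getD_eq_getElem?_getD, List.getElem?_drop]
    congr 2
    omega

-- ===== VERDICT helper: the two ports agree under Pre_ =====
theorem get_coeffs_eq (matrix : List (List Int)) (hpre : Pre_get_coeffs matrix) :
    get_coeffs matrix = get_coeffs_alt matrix := by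
  by_cases hnil : matrix = []
  · subst hnil; rfl
  · have hn0 : matrix.length ≠ 0 := by simpa using hnil
    set n : Nat := matrix.length with hn
    -- the row-length facts Pre_ gives, in getElem form
    have hrow : ∀ k (hk : k < n), n - 1 ≤ matrix[k].length ∨ (k + 2 = n ∧ n - 2 ≤ matrix[k].length) := by
      intro k hk
      have := hpre (matrix[k], k) (by rw [List.mem_iff_getElem]; exact ⟨k, by simpa using hk, by simp⟩)
      simpa using this
    -- name B's intermediate values
    set body := matrix.zipIdx.map (fun p => p.1.take p.2 ++ [-(p.1.sum)] ++ p.1.drop (p.2 + 1)) with hbody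
    set m : Nat := ((body.map List.length).min?).getD 0 with hmdef
    have hbl : body.length = n := by simp [hbody]; exact hn.symm
    have hbget : ∀ k (hk : k < n), body[k]'(by omega) =
        (matrix[k]'hk).take k ++ [-(matrix[k]'hk).sum] ++ (matrix[k]'hk).drop (k + 1) := by
      intro k hk
      simp [hbody]
    have hlenk : ∀ k (hk : k < n), n - 1 ≤ (body[k]'(by omega)).length := by
      intro k hk
      rw [hbget k hk, patch_length]
      rcases Nat.le_total k (matrix[k]'hk).length with h | h
      · rcases hrow k hk with h2 | h2 <;> simp [Nat.min_eq_left h] <;> omega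
      · rcases hrow k hk with h2 | h2 <;> simp [Nat.min_eq_right h] <;> omega
    have hm : n - 1 ≤ m := by
      cases hmin : (body.map List.length).min? with
      | none =>
        exact absurd (by simpa using List.min?_eq_none_iff.1 hmin)
          (by intro h; rw [h] at hbl; simp at hbl; omega)
      | some a =>
        have ha : n - 1 ≤ a := by
          refine (List.le_min?_iff hmin).mpr ?_
          intro x hx
          obtain ⟨row, hr, rfl⟩ := List.mem_map.1 hx
          obtain ⟨k, hk, rfl⟩ := List.mem_iff_getElem.1 hr
          exact hlenk k (by omega)
        simpa [hmdef, hmin] using ha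
    -- unfold B to the named values
    have halt : get_coeffs_alt matrix =
        ((List.range m).map (fun i => body.map (fun row => row.getD i 0))).take (n - 1)
          ++ [List.replicate n (1 : Int)] := by
      rw [get_coeffs_alt, if_neg hn0]
    rw [halt]
    -- outer extensionality
    apply List.ext_getElem
    · simp only [get_coeffs, List.length_map, PySem.List.length_pyRange_one, List.length_append,
        List.length_take, List.length_cons, List.length_nil, List.length_range]
      omega
    intro k hk1 hk2
    have hkn : k < n := by
      simpa [get_coeffs, PySem.List.length_pyRange_one] using hk1
    have htklen : (((List.range m).map (fun i => body.map (fun row => row.getD i 0))).take (n - 1)).length = n - 1 := by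
      simp; omega
    simp only [get_coeffs, List.getElem_map, PySem.List.getElem_pyRange_one, zero_add]
    by_cases hklast : k = n - 1
    · -- last row: all ones
      rw [if_neg (by omega)]
      rw [List.getElem_append_right (by omega)]
      have : k - (((List.range m).map (fun i => body.map (fun row => row.getD i 0))).take (n - 1)).length = 0 := by omega
      simp only [this, List.getElem_cons_zero]
      apply List.ext_getElem
      · simp [PySem.List.length_pyRange_one]
        exact hn.symm
      · intro j h1 h2
        simp
    · -- a body row: k < n - 1
      have hklt : k < n - 1 := by omega
      rw [if_pos (by omega)]
      rw [List.getElem_append_left (by omega)]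
      rw [List.getElem_take, List.getElem_map, List.getElem_range]
      -- inner extensionality
      apply List.ext_getElem
      · simp [PySem.List.length_pyRange_one, hbl]
        exact hn.symm
      intro j h1 h2
      have hjn : j < n := by simpa [PySem.List.length_pyRange_one] using h1
      simp only [List.getElem_map, PySem.List.getElem_pyRange_one, zero_add]
      rw [hbget j hjn]
      have hjle : j ≤ (matrix[j]'hjn).length := by
        rcases hrow j hjn with h | h <;> omega
      by_cases hjk : j = k
      · subst hjk
        rw [if_neg (by omega), patch_getD_diag _ _ _ hjle]
        rw [PySem.List.pyGetD_natCast, List.getD_eq_getElem _ _ (by omega : j < matrix.length)]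
      · have hki : k < (matrix[j]'hjn).length := by
          rcases hrow j hjn with h | h <;> omega
        rw [if_pos (by omega)]
        rw [patch_getD_off _ _ _ _ (Ne.symm hjk) hjle]
        rw [PySem.List.pyGetD_natCast, PySem.List.pyGetD_natCast,
          List.getD_eq_getElem _ _ (by omega : j < matrix.length)]

theorem get_coeffs_spec : Claim_equal_get_coeffs := by
  intro matrix _ hpre
  unfold Spec_get_coeffs
  exact get_coeffs_eq matrix hpre
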